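-- pv_equiv track=rewrite | github.com/oasis-code/python-code-assignment-one | number 1.py | vowel
-- ===== SOURCE A (Python) =====
-- def vowel(word):
--
--     vowels = "aeiou" #sring of all vowels
--
--     string = word.lower() #returning the original string. this string contains duplicates
--
--     newstring = set(string) # removing duplicates in the original string
--
--     count = len(string)-len(newstring) #getting the number of duplicates
--
--     vowelstring = "" #string of vowels contained in last string
--
-- #adding vowels from the last string to the vowel string
--     for x in vowels:
--         if x in newstring:
--             vowelstring += str(x)
--
--     return (vowelstring, count)
-- ===== SOURCE B (Python) =====
-- def vowel(word):
--     s = word.lower()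
--     t = sorted(s)
--     dup = sum(1 for x, y in zip(t, t[1:]) if x == y)
--     return ("".join(v for v in "aeiou" if v in s), dup)
-- ===== Notes on version B (the rewrite author's own statement) =====
-- stated objective: alternative
-- what changed: Replaces A's build-a-set-then-subtract-lengths with sorting the lowercased word and counting adjacent equal pairs for the duplicate count, and tests each vowel by direct membership in the lowercased string instead of in a set.
import Mathlib
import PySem

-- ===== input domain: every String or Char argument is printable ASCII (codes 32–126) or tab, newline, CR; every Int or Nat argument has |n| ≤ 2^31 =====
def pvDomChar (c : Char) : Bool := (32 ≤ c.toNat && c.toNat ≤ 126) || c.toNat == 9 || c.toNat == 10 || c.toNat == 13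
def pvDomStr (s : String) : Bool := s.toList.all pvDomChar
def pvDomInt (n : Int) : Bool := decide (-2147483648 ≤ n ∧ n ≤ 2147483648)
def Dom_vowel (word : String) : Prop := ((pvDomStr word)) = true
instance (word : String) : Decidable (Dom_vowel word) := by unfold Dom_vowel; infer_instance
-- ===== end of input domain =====

-- B replaces A's "build set(word), subtract lengths" with sort-then-adjacent-scan for the duplicate count and a direct membership test on the lowercased string for the vowels (alternative algorithm, no set).


-- ===== PORT A =====
def vowel (word : String) : String × Int :=
  let vowels := "aeiou"
  let string := (PySem.Str.lower word).toList
  let newstring := PySem.Set.ofList string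
  let count : Int := (string.length : Int) - (PySem.Set.len newstring)
  let vowelstring := vowels.toList.foldl
    (fun acc x => if PySem.Set.contains newstring x then acc ++ [x] else acc) []
  (String.ofList vowelstring, count)

-- ===== PORT B =====
def vowel_alt (word : String) : String × Int :=
  let s := (PySem.Str.lower word).toList
  let t := PySem.List.sorted s (fun c => c) false
  let dup : Int := (t.zip (t.drop 1)).foldl
    (fun acc p => if p.1 = p.2 then acc + 1 else acc) 0
  -- 'v in s' (single-char needle in a string) ported as char-list membership; exact for 1-char needles
  (String.ofList ("aeiou".toList.filter (fun v => s.contains v)), dup)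

-- ===== PRECONDITION & SPEC =====
def Spec_vowel (word : String) (out : String × Int) : Prop := out = vowel_alt word
instance (word : String) (out : String × Int) : Decidable (Spec_vowel word out) := by unfold Spec_vowel; infer_instance

-- ===== CLAIM (what is proved, stated in full; the proofs are below) =====
def Claim_equal_vowel : Prop := ∀ (word : String), Dom_vowel word → Spec_vowel word (vowel word)

-- ===== LEMMAS AND PROOFS =====

-- In a ≤-sorted list, the number of adjacent equal pairs plus the number of distinct elements is the length.
theorem countAdj_sorted (t : List Char) (h : t.Pairwise (· ≤ ·)) :
    (t.zip (t.drop 1)).countP (fun p => decide (p.1 = p.2)) + t.toFinset.card = t.length := by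
  induction t with
  | nil => simp
  | cons a r ih =>
      cases r with
      | nil => simp
      | cons b r' =>
          have hab : a ≤ b := (List.pairwise_cons.mp h).1 b (by simp)
          have hr : (b :: r').Pairwise (· ≤ ·) := (List.pairwise_cons.mp h).2
          have ihr := ih hr
          have hz : (a :: b :: r').zip ((a :: b :: r').drop 1)
              = (a, b) :: ((b :: r').zip ((b :: r').drop 1)) := by simp
          rw [hz, List.countP_cons]
          by_cases hEq : a = b
          · subst hEq
            rw [if_pos (by simp),
              show (a :: a :: r').toFinset = (a :: r').toFinset by simp]
            simp only [List.length_cons] at ihr ⊢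
            omega
          · have hnotin : a ∉ (b :: r') := by
              intro hmem
              rcases List.mem_cons.mp hmem with h1 | h2
              · exact hEq h1
              · exact hEq (le_antisymm hab ((List.pairwise_cons.mp hr).1 a h2))
            rw [if_neg (by simp [hEq])]
            have hcard : (a :: b :: r').toFinset.card = (b :: r').toFinset.card + 1 := by
              rw [List.toFinset_cons, Finset.card_insert_of_notMem (by simpa using hnotin)]
            simp only [List.length_cons, hcard] at *
            omega

-- Python's set(s) has as many elements as s has distinct characters.
theorem ofList_length_eq_card (s : List Char) :
    (PySem.Set.ofList s).length = s.toFinset.card := by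
  have hnd := PySem.Set.nodup_ofList (xs := s)
  have hfs : (PySem.Set.ofList s).toFinset = s.toFinset := by
    ext x; simp [PySem.Set.mem_ofList]
  rw [← List.toFinset_card_of_nodup hnd, hfs]

-- ===== VERDICT (by name: the statement is the Claim_ definition above) =====
theorem vowel_spec : Claim_equal_vowel := by
  intro word _
  show vowel word = vowel_alt word
  unfold vowel vowel_alt
  simp only [PySem.List.foldl_append_if_eq_filter, PySem.List.foldl_ite_add_one,
    List.nil_append, zero_add, Prod.mk.injEq]
  set s := (PySem.Str.lower word).toList with hs
  constructor
  · congr 1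
    apply List.filter_congr
    intro v _
    simp [PySem.Set.mem_ofList]
  · have hperm : (PySem.List.sorted s (fun c => c) false).Perm s := PySem.List.sorted_perm s (fun c => c) false
    have hkey := countAdj_sorted _ (PySem.List.sorted_pairwise (xs := s) (key := fun c => c))
    have hfs : (PySem.List.sorted s (fun c => c) false).toFinset = s.toFinset := by
      ext x; simp [hperm.mem_iff]
    rw [hperm.length_eq, hfs] at hkey
    simp only [PySem.Set.len, ofList_length_eq_card]
    omega
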